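-- pv_equiv track=rewrite | github.com/medamineaka/cv_analysis | src/classification_section.py | _match_dataset
-- ===== SOURCE A (Python) =====
-- def _match_dataset(texte_norm: str, dataset: set, seuil: int = 4) -> bool:
--     mots = texte_norm.split()
--     for mot in mots:
--         if len(mot) >= seuil and mot in dataset:
--             return True
--     for i in range(len(mots) - 1):
--         if mots[i] + " " + mots[i + 1] in dataset:
--             return True
--     return False
-- ===== SOURCE B (Python) =====
-- def _match_dataset(texte_norm: str, dataset: set, seuil: int = 4) -> bool:
--     # Inverted traversal: instead of scanning the text's candidates against the
--     # dataset, index the text once (its word set and its adjacent-pair set) and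
--     # scan the DATASET, parsing each entry to decide which index answers it.
--     mots = texte_norm.split()
--     words = set(mots)
--     pairs = set(zip(mots, mots[1:]))
--     for d in dataset:
--         if len(d) >= seuil and d in words:
--             return True
--         head, sep, tail = d.partition(" ")
--         if sep and (head, tail) in pairs:
--             return True
--     return False
-- ===== Notes on version B (the rewrite author's own statement) =====
-- stated objective: alternative
-- what changed: Inverts the traversal: instead of scanning the text's words and index-built bigrams and testing each against the dataset, B indexes the text once (a word set and an adjacent-pair set) and iterates over the DATASET, parsing each entry with partition(' ') to decide whether it is answered by the word index or the pair index.
import Mathlib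
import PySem

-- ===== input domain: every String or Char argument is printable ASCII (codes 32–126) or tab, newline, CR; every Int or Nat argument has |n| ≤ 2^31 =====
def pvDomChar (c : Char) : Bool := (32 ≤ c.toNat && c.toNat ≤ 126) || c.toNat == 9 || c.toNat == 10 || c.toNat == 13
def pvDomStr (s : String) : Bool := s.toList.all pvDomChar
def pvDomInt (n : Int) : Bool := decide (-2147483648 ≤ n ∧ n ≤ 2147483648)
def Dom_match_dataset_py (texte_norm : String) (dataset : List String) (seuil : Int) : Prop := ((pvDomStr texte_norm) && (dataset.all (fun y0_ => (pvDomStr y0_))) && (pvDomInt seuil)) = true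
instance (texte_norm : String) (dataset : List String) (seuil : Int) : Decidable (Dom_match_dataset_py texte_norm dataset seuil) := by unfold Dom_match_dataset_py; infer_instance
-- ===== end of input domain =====

-- B inverts the traversal: it indexes the text once (word set + adjacent-pair set) and scans the
-- DATASET, parsing each entry with partition(" ") to decide which index answers it (objective: alternative).


-- ===== PORT A =====
-- first loop: 'for mot in mots: if len(mot) >= seuil and mot in dataset: return True'
def matchA_loop1 : List String → List String → Int → Bool
  | [], _, _ => false
  | mot :: rest, ds, seuil =>
    if decide (seuil ≤ PySem.Str.len mot) && ds.contains mot then true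
    else matchA_loop1 rest ds seuil

-- second loop: 'for i in range(len(mots)-1): if mots[i] + " " + mots[i+1] in dataset: return True'
-- (i is always in range here, so mots[i] is ported as pyGetD with an unused default)
def matchA_loop2 (mots ds : List String) : List Int → Bool
  | [] => false
  | i :: rest =>
    if ds.contains (PySem.List.pyGetD mots i "" ++ " " ++ PySem.List.pyGetD mots (i + 1) "") then true
    else matchA_loop2 mots ds rest

def match_dataset_py (texte_norm : String) (dataset : List String) (seuil : Int) : Bool :=
  let mots := PySem.Str.split₀ texte_norm
  if matchA_loop1 mots dataset seuil then true
  else matchA_loop2 mots dataset (PySem.List.pyRange 0 (PySem.List.len mots - 1) 1)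

-- ===== PORT B =====
-- hand port of "head, sep, tail = d.partition(' ')" for the one-character separator " ":
-- split at the FIRST space; none = no space in d. Exact for a single-character separator.
def bPartitionSpace (d : String) : Option (String × String) :=
  match d.toList.dropWhile (fun c => c != ' ') with
  | [] => none
  | _ :: tail => some (String.ofList (d.toList.takeWhile (fun c => c != ' ')), String.ofList tail)

-- 'for d in dataset: …' with the two index lookups and early exit
def bLoop (words : PySem.Set String) (pairs : PySem.Set (String × String)) (seuil : Int) : List String → Bool
  | [] => false
  | d :: rest =>
    if decide (seuil ≤ PySem.Str.len d) && PySem.Set.contains words d then true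
    else
      match bPartitionSpace d with
      | some p => if PySem.Set.contains pairs p then true else bLoop words pairs seuil rest
      | none => bLoop words pairs seuil rest

def match_dataset_py_alt (texte_norm : String) (dataset : List String) (seuil : Int) : Bool :=
  let mots := PySem.Str.split₀ texte_norm
  let words : PySem.Set String := PySem.Set.ofList mots
  let pairs : PySem.Set (String × String) := PySem.Set.ofList (mots.zip mots.tail)
  bLoop words pairs seuil dataset

-- ===== PRECONDITION & SPEC =====
def Spec_match_dataset_py (texte_norm : String) (dataset : List String) (seuil : Int) (out : Bool) : Prop := out = match_dataset_py_alt texte_norm dataset seuil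
instance (texte_norm : String) (dataset : List String) (seuil : Int) (out : Bool) : Decidable (Spec_match_dataset_py texte_norm dataset seuil out) := by unfold Spec_match_dataset_py; infer_instance

-- ===== CLAIM (what is proved, stated in full; the proofs are below) =====
def Claim_equal_match_dataset_py : Prop := ∀ (texte_norm : String) (dataset : List String) (seuil : Int), Dom_match_dataset_py texte_norm dataset seuil → Spec_match_dataset_py texte_norm dataset seuil (match_dataset_py texte_norm dataset seuil)

-- ===== LEMMAS AND PROOFS =====
theorem matchA_loop1_eq_any (mots ds : List String) (seuil : Int) :
    matchA_loop1 mots ds seuil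
      = mots.any (fun m => decide (seuil ≤ PySem.Str.len m) && ds.contains m) := by
  induction mots with
  | nil => rfl
  | cons m rest ih =>
    simp only [matchA_loop1]
    rw [ih]
    cases hc : (decide (seuil ≤ PySem.Str.len m) && ds.contains m) <;> simp_all

theorem matchA_loop2_eq_any (mots ds : List String) (is : List Int) :
    matchA_loop2 mots ds is
      = is.any (fun i => ds.contains (PySem.List.pyGetD mots i "" ++ " " ++ PySem.List.pyGetD mots (i + 1) "")) := by
  induction is with
  | nil => rfl
  | cons i rest ih =>
    simp only [matchA_loop2]
    rw [ih]
    cases hc : ds.contains (PySem.List.pyGetD mots i "" ++ " " ++ PySem.List.pyGetD mots (i + 1) "") <;> simp_all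

theorem range_pairs_eq_zip_any (f : String → String → Bool) :
    ∀ (xs : List String),
      (List.range (xs.length - 1)).any (fun k => f (xs.getD k "") (xs.getD (k + 1) ""))
        = (xs.zip xs.tail).any (fun p => f p.1 p.2) := by
  intro xs
  induction xs with
  | nil => rfl
  | cons a rest ih =>
    cases rest with
    | nil => rfl
    | cons b r =>
      have hlen : (a :: b :: r).length - 1 = ((b :: r).length - 1) + 1 := by simp
      rw [hlen, List.range_succ_eq_map]
      simp only [List.any_cons, List.any_map, Function.comp_def]
      show (f a b || (List.range ((b :: r).length - 1)).any
          (fun k => f ((b :: r).getD k "") ((b :: r).getD (k + 1) ""))) = _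
      rw [ih]
      rfl

theorem pyRange_any_eq_zip (ds : List String) (xs : List String) :
    (PySem.List.pyRange 0 ((xs.length : Int) - 1) 1).any
        (fun i => ds.contains (PySem.List.pyGetD xs i "" ++ " " ++ PySem.List.pyGetD xs (i + 1) ""))
      = (xs.zip xs.tail).any (fun p => ds.contains (p.1 ++ " " ++ p.2)) := by
  rw [PySem.List.pyRange_one, List.any_map]
  have h2 : ((xs.length : Int) - 1 - 0).toNat = xs.length - 1 := by omega
  rw [h2]
  have hfun : ((fun i => ds.contains (PySem.List.pyGetD xs i "" ++ " " ++ PySem.List.pyGetD xs (i + 1) "")) ∘ fun k : Nat => 0 + (k : Int))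
      = fun k : Nat => ds.contains (xs.getD k "" ++ " " ++ xs.getD (k + 1) "") := by
    funext k
    show ds.contains (PySem.List.pyGetD xs (0 + (k : Int)) "" ++ " " ++ PySem.List.pyGetD xs (0 + (k : Int) + 1) "") = _
    rw [show (0 : Int) + (k : Int) + 1 = ((k + 1 : Nat) : Int) by push_cast; ring,
        show (0 : Int) + (k : Int) = ((k : Nat) : Int) by ring,
        PySem.List.pyGetD_natCast, PySem.List.pyGetD_natCast]
  rw [hfun]
  exact range_pairs_eq_zip_any (fun a b => ds.contains (a ++ " " ++ b)) xs

theorem bLoop_eq_any (words : PySem.Set String) (pairs : PySem.Set (String × String)) (seuil : Int)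
    (ds : List String) :
    bLoop words pairs seuil ds
      = ds.any (fun d =>
          (decide (seuil ≤ PySem.Str.len d) && PySem.Set.contains words d)
          || (match bPartitionSpace d with
              | some p => PySem.Set.contains pairs p
              | none => false)) := by
  induction ds with
  | nil => rfl
  | cons d rest ih =>
    simp only [bLoop, List.any_cons]
    rw [← ih]
    cases h1 : (decide (seuil ≤ PySem.Str.len d) && PySem.Set.contains words d)
    · cases hp : bPartitionSpace d with
      | none => simp
      | some p =>
        cases hc : PySem.Set.contains pairs p <;> simp
    · simp

-- tokens produced by split() contain no whitespace character
theorem go_no_space : ∀ (s cur : List Char) (acc : List (List Char)),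
    (∀ c ∈ cur, PySem.Chars.isspace c = false) →
    (∀ t ∈ acc, ∀ c ∈ t, PySem.Chars.isspace c = false) →
    ∀ t ∈ PySem.Chars.split₀.go s cur acc, ∀ c ∈ t, PySem.Chars.isspace c = false := by
  intro s
  induction s with
  | nil =>
    intro cur acc hcur hacc t ht
    simp only [PySem.Chars.split₀.go] at ht
    split_ifs at ht with h
    · exact hacc t (by simpa using ht)
    · rw [List.mem_reverse, List.mem_cons] at ht
      rcases ht with ht | ht
      · subst ht; intro c hc; exact hcur c (by simpa using hc)
      · exact hacc t ht
  | cons c rest ih =>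
    intro cur acc hcur hacc t ht
    simp only [PySem.Chars.split₀.go] at ht
    split_ifs at ht with h1 h2
    · exact ih [] acc (by simp) hacc t ht
    · refine ih [] (cur.reverse :: acc) (by simp) ?_ t ht
      intro u hu
      rcases List.mem_cons.mp hu with hu | hu
      · subst hu; intro x hx; exact hcur x (by simpa using hx)
      · exact hacc u hu
    · refine ih (c :: cur) acc ?_ hacc t ht
      intro x hx
      rcases List.mem_cons.mp hx with hx | hx
      · subst hx; exact Bool.eq_false_iff.mpr h1
      · exact hcur x hx

theorem token_no_space (s w : String) (hw : w ∈ PySem.Str.split₀ s) : ' ' ∉ w.toList := by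
  intro hsp
  have hmem : w.toList ∈ PySem.Chars.split₀ s.toList := by
    rw [← PySem.Str.split₀_map_toList]
    exact List.mem_map.mpr ⟨w, hw, rfl⟩
  have := go_no_space s.toList [] [] (by simp) (by simp) w.toList
    (by simpa [PySem.Chars.split₀] using hmem) ' ' hsp
  simp [show PySem.Chars.isspace ' ' = true from by decide] at this

theorem takeDrop_space (l r : List Char) (hl : ' ' ∉ l) :
    (l ++ ' ' :: r).takeWhile (fun c => c != ' ') = l
    ∧ (l ++ ' ' :: r).dropWhile (fun c => c != ' ') = ' ' :: r := by
  induction l with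
  | nil => simp
  | cons c cs ih =>
    have hc : (c != ' ') = true := by
      simp only [bne_iff_ne, ne_eq]
      intro h; exact hl (by simp [h])
    have ih' := ih (fun h => hl (List.mem_cons_of_mem _ h))
    simp [hc, ih'.1, ih'.2]

theorem bPartition_append (a b : String) (ha : ' ' ∉ a.toList) :
    bPartitionSpace (a ++ " " ++ b) = some (a, b) := by
  have htl : (a ++ " " ++ b).toList = a.toList ++ ' ' :: b.toList := by
    rw [String.toList_append, String.toList_append]
    simp [show (" " : String).toList = [' '] from by decide]
  obtain ⟨h1, h2⟩ := takeDrop_space a.toList b.toList ha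
  simp only [bPartitionSpace, htl, h1, h2]
  rw [show String.ofList a.toList = a from String.toList_inj.mp (by rw [String.toList_ofList]),
      show String.ofList b.toList = b from String.toList_inj.mp (by rw [String.toList_ofList])]

theorem dropWhile_cons_split (cs : List Char) :
    ∀ x tail, cs.dropWhile (fun c => c != ' ') = x :: tail →
      cs = cs.takeWhile (fun c => c != ' ') ++ ' ' :: tail := by
  induction cs with
  | nil => intro x tail h; simp [List.dropWhile] at h
  | cons c cs' ih =>
    intro x tail h
    by_cases hc : (c != ' ') = true
    · rw [List.dropWhile_cons, if_pos hc] at h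
      rw [List.takeWhile_cons, if_pos hc, List.cons_append]
      exact congrArg (c :: ·) (ih x tail h)
    · rw [List.dropWhile_cons, if_neg hc] at h
      have hce : c = ' ' := by simpa using hc
      rw [List.takeWhile_cons, if_neg hc]
      injection h with hx htail
      simp [hce, htail]

theorem bPartition_some (d h t : String) (hp : bPartitionSpace d = some (h, t)) :
    d = h ++ " " ++ t := by
  unfold bPartitionSpace at hp
  cases hd : d.toList.dropWhile (fun c => c != ' ') with
  | nil => rw [hd] at hp; exact absurd hp (by simp)
  | cons x tail =>
    rw [hd] at hp
    injection hp with hp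
    have hh : h = String.ofList (d.toList.takeWhile (fun c => c != ' ')) := (congrArg Prod.fst hp).symm
    have ht : t = String.ofList tail := (congrArg Prod.snd hp).symm
    apply String.toList_inj.mp
    rw [String.toList_append, String.toList_append, hh, ht,
        String.toList_ofList, String.toList_ofList]
    simpa using dropWhile_cons_split d.toList x tail hd

theorem fst_mem_of_mem_zip {α β : Type} (xs : List α) (ys : List β) (p : α × β)
    (h : p ∈ xs.zip ys) : p.1 ∈ xs := by
  induction xs generalizing ys with
  | nil => simp at h
  | cons a xs' ih =>
    cases ys with
    | nil => simp at h
    | cons b ys' =>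
      rcases List.mem_cons.mp h with h | h
      · subst h; exact List.mem_cons_self
      · exact List.mem_cons_of_mem _ (ih ys' h)

-- Set.contains on a PySem.Set is list membership
theorem set_contains_iff {α : Type} [BEq α] [LawfulBEq α] (s : PySem.Set α) (x : α) :
    PySem.Set.contains s x = true ↔ x ∈ s := by
  simp [PySem.Set.contains]

-- ===== VERDICT (by name: the statement is the Claim_ definition above) =====
theorem match_dataset_py_spec : Claim_equal_match_dataset_py := by
  intro texte_norm dataset seuil _
  unfold Spec_match_dataset_py match_dataset_py match_dataset_py_alt
  dsimp only
  rw [Bool.eq_iff_iff]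
  rw [matchA_loop1_eq_any, matchA_loop2_eq_any, PySem.List.len_eq, pyRange_any_eq_zip, bLoop_eq_any]
  constructor
  · intro hA
    rw [List.any_eq_true]
    split_ifs at hA with h1
    · -- a long-enough word occurs in the dataset
      obtain ⟨m, hm, hcond⟩ := List.any_eq_true.mp h1
      rw [Bool.and_eq_true, decide_eq_true_eq, List.contains_iff_mem] at hcond
      refine ⟨m, hcond.2, ?_⟩
      rw [Bool.or_eq_true, Bool.and_eq_true, decide_eq_true_eq]
      exact Or.inl ⟨hcond.1, (set_contains_iff _ _).mpr ((PySem.Set.mem_ofList _ _).mpr hm)⟩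
    · -- an adjacent bigram occurs in the dataset
      obtain ⟨p, hp, hcond⟩ := List.any_eq_true.mp hA
      rw [List.contains_iff_mem] at hcond
      refine ⟨p.1 ++ " " ++ p.2, hcond, ?_⟩
      rw [Bool.or_eq_true]
      right
      have hp1 : p.1 ∈ PySem.Str.split₀ texte_norm := fst_mem_of_mem_zip _ _ _ hp
      rw [bPartition_append p.1 p.2 (token_no_space _ _ hp1)]
      exact (set_contains_iff _ _).mpr ((PySem.Set.mem_ofList _ _).mpr hp)
  · intro hB
    obtain ⟨d, hd, hcond⟩ := List.any_eq_true.mp hB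
    rw [Bool.or_eq_true] at hcond
    rcases hcond with hw | hpair
    · -- the dataset entry is a long-enough word of the text
      rw [Bool.and_eq_true, decide_eq_true_eq] at hw
      have hdm : d ∈ PySem.Str.split₀ texte_norm :=
        (PySem.Set.mem_ofList _ _).mp ((set_contains_iff _ _).mp hw.2)
      have h1 : (PySem.Str.split₀ texte_norm).any
          (fun m => decide (seuil ≤ PySem.Str.len m) && dataset.contains m) = true :=
        List.any_eq_true.mpr ⟨d, hdm,
          by rw [Bool.and_eq_true, List.contains_iff_mem, decide_eq_true_eq]; exact ⟨hw.1, hd⟩⟩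
      rw [if_pos h1]
    · -- the dataset entry parses as an adjacent pair of the text
      cases hp : bPartitionSpace d with
      | none => rw [hp] at hpair; exact absurd hpair (by simp)
      | some p =>
        rw [hp] at hpair
        have hpz : p ∈ (PySem.Str.split₀ texte_norm).zip (PySem.Str.split₀ texte_norm).tail :=
          (PySem.Set.mem_ofList _ _).mp ((set_contains_iff _ _).mp hpair)
        have hde : d = p.1 ++ " " ++ p.2 := bPartition_some d p.1 p.2 (by rw [hp])
        split_ifs with h1
        · rfl
        · exact List.any_eq_true.mpr ⟨p, hpz, by rw [List.contains_iff_mem, ← hde]; exact hd⟩
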